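-- pv_equiv track=rewrite | github.com/zach-hois/SmithWatermanAlgorithm | smith_waterman/algs.py | alignmentString
-- ===== SOURCE A (Python) =====
-- def alignmentString(alignedSeq1, alignedSeq2):
-- 	"""
-- 	this is a visualization of how well the sequences are aligned, we'll print this
-- 	same nucleotide is |, gaps are -, and mismatch is X
-- 	"""
-- 	idents, gaps, mismatches = 0,0,0 #initialization
-- 	alignmentString = []
-- 	for base1, base2 in zip(alignedSeq1, alignedSeq2):
-- 		if base1 == base2: #if the bases are the same we show the match symbol
-- 			alignmentString.append('|')
-- 			idents +=1
-- 		elif '-' in (base1, base2): #if there is a gap required we put in a space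
-- 			alignmentString.append(' ')
-- 			gaps += 1
-- 		else:
-- 			alignmentString.append('X') #if they do not match but no gap put an X
-- 			mismatches += 1
-- 	return ''.join(alignmentString), idents, gaps, mismatches
-- ===== SOURCE B (Python) =====
-- def alignmentString(alignedSeq1, alignedSeq2):
--     # Layered painting: first paint a gap/mismatch canvas (no equality test at all),
--     # then overwrite matched positions with '|'; mismatches fall out arithmetically.
--     pairs = list(zip(alignedSeq1, alignedSeq2))
--     canvas = [' ' if b1 == '-' or b2 == '-' else 'X' for b1, b2 in pairs]
--     canvas = ['|' if b1 == b2 else c for (b1, b2), c in zip(pairs, canvas)]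
--     result = ''.join(canvas)
--     idents = result.count('|')
--     gaps = result.count(' ')
--     return result, idents, gaps, len(canvas) - idents - gaps
-- ===== Notes on version B (the rewrite author's own statement) =====
-- stated objective: alternative
-- what changed: B replaces A's single three-way-branching counting loop by layered painting: it first paints a canvas of ' '/'X' from the gap test only, then a second pass overwrites equal positions with '|', and derives idents/gaps by scans of the finished string and mismatches arithmetically as length minus the other two.
import Mathlib
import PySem

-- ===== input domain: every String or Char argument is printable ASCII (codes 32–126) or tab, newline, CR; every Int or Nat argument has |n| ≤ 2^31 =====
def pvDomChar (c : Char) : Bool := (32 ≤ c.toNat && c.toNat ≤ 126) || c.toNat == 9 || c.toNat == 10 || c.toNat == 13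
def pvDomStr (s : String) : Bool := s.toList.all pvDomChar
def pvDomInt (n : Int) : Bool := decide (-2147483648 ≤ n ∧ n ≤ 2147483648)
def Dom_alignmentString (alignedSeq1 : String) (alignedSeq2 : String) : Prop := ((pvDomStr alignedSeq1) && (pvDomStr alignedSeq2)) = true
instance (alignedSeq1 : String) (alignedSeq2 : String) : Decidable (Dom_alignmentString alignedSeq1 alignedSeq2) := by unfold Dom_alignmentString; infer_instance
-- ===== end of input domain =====

-- B replaces A's single counting loop by layered painting (gap canvas, then overwrite
-- matches) with mismatches derived arithmetically; alternative decomposition, same cost.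

-- ===== PORT A =====
-- loop body of A's for-loop (append symbol, bump the matching counter)
def pvStepA (st : List Char × Int × Int × Int) (p : Char × Char) : List Char × Int × Int × Int :=
  let (l, i, g, m) := st
  if p.1 == p.2 then (l ++ ['|'], i + 1, g, m)
  else if p.1 == '-' || p.2 == '-' then (l ++ [' '], i, g + 1, m)
  else (l ++ ['X'], i, g, m + 1)

def alignmentString (alignedSeq1 : String) (alignedSeq2 : String) : String × Int × Int × Int :=
  let r := (alignedSeq1.toList.zip alignedSeq2.toList).foldl pvStepA
    (([] : List Char), (0 : Int), (0 : Int), (0 : Int))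
  (String.ofList r.1, r.2.1, r.2.2.1, r.2.2.2)

-- ===== PORT B =====
def alignmentString_alt (alignedSeq1 : String) (alignedSeq2 : String) : String × Int × Int × Int :=
  let pairs := alignedSeq1.toList.zip alignedSeq2.toList
  let canvas := pairs.map (fun p => if p.1 == '-' || p.2 == '-' then ' ' else 'X')
  let canvas2 := (pairs.zip canvas).map (fun q => if q.1.1 == q.1.2 then '|' else q.2)
  let result := String.ofList canvas2
  let idents : Int := canvas2.count '|'
  let gaps : Int := canvas2.count ' '
  (result, idents, gaps, (canvas2.length : Int) - idents - gaps)

-- ===== PRECONDITION & SPEC =====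
def Spec_alignmentString (alignedSeq1 : String) (alignedSeq2 : String) (out : String × Int × Int × Int) : Prop := out = alignmentString_alt alignedSeq1 alignedSeq2
instance (alignedSeq1 : String) (alignedSeq2 : String) (out : String × Int × Int × Int) : Decidable (Spec_alignmentString alignedSeq1 alignedSeq2 out) := by unfold Spec_alignmentString; infer_instance

-- ===== CLAIM (what is proved, stated in full; the proofs are below) =====
def Claim_equal_alignmentString : Prop := ∀ (alignedSeq1 : String) (alignedSeq2 : String), Dom_alignmentString alignedSeq1 alignedSeq2 → Spec_alignmentString alignedSeq1 alignedSeq2 (alignmentString alignedSeq1 alignedSeq2)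

-- ===== LEMMAS AND PROOFS =====
-- the per-pair symbol both algorithms end up producing
def pvSym (p : Char × Char) : Char :=
  if p.1 == p.2 then '|' else if p.1 == '-' || p.2 == '-' then ' ' else 'X'

-- B's two painting layers collapse to a single map by pvSym
theorem pv_layers_eq (ps : List (Char × Char)) :
    (ps.zip (ps.map (fun p => if p.1 == '-' || p.2 == '-' then ' ' else 'X'))).map
      (fun q => if q.1.1 == q.1.2 then '|' else q.2)
    = ps.map pvSym := by
  induction ps with
  | nil => rfl
  | cons p ps ih => simp only [List.map_cons, List.zip_cons_cons, ih, pvSym]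

-- the three symbols partition the canvas, so mismatches = length − idents − gaps
theorem pv_count_X (ps : List (Char × Char)) :
    ((ps.map pvSym).count 'X' : Int)
    = (ps.length : Int) - ((ps.map pvSym).count '|' : Int) - ((ps.map pvSym).count ' ' : Int) := by
  induction ps with
  | nil => simp
  | cons p ps ih =>
    rw [List.map_cons]
    by_cases h1 : p.1 == p.2
    · simp [pvSym, h1]; omega
    · by_cases h2 : p.1 == '-' || p.2 == '-'
      · have : pvSym p = ' ' := by simp only [pvSym]; rw [if_neg (by simp_all), if_pos h2]
        simp [this]; omega
      · have : pvSym p = 'X' := by simp only [pvSym]; rw [if_neg (by simp_all), if_neg (by simp_all)]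
        simp [this]; omega

-- A's fold accumulates exactly the canvas and its three counts
theorem pv_fold_inv (ps : List (Char × Char)) (l : List Char) (i g m : Int) :
    ps.foldl pvStepA (l, i, g, m)
    = (l ++ ps.map pvSym,
       i + ((ps.map pvSym).count '|' : Int),
       g + ((ps.map pvSym).count ' ' : Int),
       m + ((ps.map pvSym).count 'X' : Int)) := by
  induction ps generalizing l i g m with
  | nil => simp
  | cons p ps ih =>
    rw [List.foldl_cons, List.map_cons]
    by_cases h1 : p.1 == p.2
    · have hstep : pvStepA (l, i, g, m) p = (l ++ ['|'], i + 1, g, m) := by simp [pvStepA, h1]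
      have hc : pvSym p = '|' := by simp [pvSym, h1]
      rw [hstep, ih]; simp [hc, Prod.ext_iff]; all_goals omega
    · by_cases h2 : p.1 == '-' || p.2 == '-'
      · have hstep : pvStepA (l, i, g, m) p = (l ++ [' '], i, g + 1, m) := by
          simp only [pvStepA]; rw [if_neg (by simp_all), if_pos h2]
        have hc : pvSym p = ' ' := by simp only [pvSym]; rw [if_neg (by simp_all), if_pos h2]
        rw [hstep, ih]; simp [hc, Prod.ext_iff]; all_goals omega
      · have hstep : pvStepA (l, i, g, m) p = (l ++ ['X'], i, g, m + 1) := by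
          simp only [pvStepA]; rw [if_neg (by simp_all), if_neg (by simp_all)]
        have hc : pvSym p = 'X' := by simp only [pvSym]; rw [if_neg (by simp_all), if_neg (by simp_all)]
        rw [hstep, ih]; simp [hc, Prod.ext_iff]; all_goals omega

-- ===== VERDICT (by name: the statement is the Claim_ definition above) =====
theorem alignmentString_spec : Claim_equal_alignmentString := by
  intro s1 s2 _
  unfold Spec_alignmentString alignmentString alignmentString_alt
  simp only [pv_fold_inv, pv_layers_eq, pv_count_X]
  simp
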